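-- pv_equiv track=rewrite | github.com/yenhao/text-level-gnn | utils.py | get_word_neighbor
-- ===== SOURCE A (Python) =====
-- def get_word_neighbor(text_tokens: list, neighbor_distance: int) :
--     """Get word token's adjacency neighbors with distance : neighbor_distance
--
--     Args:
--         text_tokens (list): A list of the tokens of sentences/texts from dataset.
--         neighbor_distance (int): The adjacency distance to consider as a neighbor.
--
--     Returns:
--         list: A nested list with 2 dimensions, which is a list of neighbor word tokens (2nd dim) for all tokens (1nd dim)
--     """
--     text_len = len(text_tokens)
--
--     edge_neighbors = []
--     for w_idx in range(text_len):
--         skip_neighbors = []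
--         # check before
--         for sk_i in range(neighbor_distance):
--             before_idx = w_idx -1 - sk_i
--             skip_neighbors.append(text_tokens[before_idx] if before_idx > -1 else 0)
--
--         # check after
--         for sk_i in range(neighbor_distance):
--             after_idx = w_idx +1 +sk_i
--             skip_neighbors.append(text_tokens[after_idx] if after_idx < text_len else 0)
--
--         edge_neighbors.append(skip_neighbors)
--     return edge_neighbors
-- ===== SOURCE B (Python) =====
-- def get_word_neighbor(text_tokens: list, neighbor_distance: int):
--     d = max(neighbor_distance, 0)
--     padded = [0] * d + text_tokens + [0] * d
--     return [padded[w:w + d][::-1] + padded[w + d + 1:w + 2 * d + 1]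
--             for w in range(len(text_tokens))]
-- ===== Notes on version B (the rewrite author's own statement) =====
-- stated objective: simpler
-- what changed: Replaces A's two index-guarded inner loops per token with a single zero-padded copy of the list, from which each row is read as a reversed before-slice plus an after-slice.
import Mathlib
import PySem

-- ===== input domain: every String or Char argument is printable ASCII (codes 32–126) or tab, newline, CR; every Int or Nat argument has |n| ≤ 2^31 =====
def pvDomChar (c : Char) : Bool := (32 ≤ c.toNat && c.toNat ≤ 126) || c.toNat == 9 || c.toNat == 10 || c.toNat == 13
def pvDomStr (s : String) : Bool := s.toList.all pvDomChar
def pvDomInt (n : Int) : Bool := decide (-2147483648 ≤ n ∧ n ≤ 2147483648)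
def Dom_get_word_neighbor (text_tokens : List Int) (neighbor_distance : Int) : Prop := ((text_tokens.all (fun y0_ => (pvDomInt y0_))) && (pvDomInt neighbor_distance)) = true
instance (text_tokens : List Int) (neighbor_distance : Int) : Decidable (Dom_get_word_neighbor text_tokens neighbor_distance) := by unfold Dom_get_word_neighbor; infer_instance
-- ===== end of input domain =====

-- B builds one zero-padded copy of the token list and reads each row as two slice windows (before-window reversed),
-- replacing A's two index-guarded inner loops (objective: simpler).

-- ===== PORT A =====
def get_word_neighbor (text_tokens : List Int) (neighbor_distance : Int) : List (List Int) :=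
  let text_len : Int := text_tokens.length
  (PySem.List.pyRange 0 text_len 1).foldl (fun edge_neighbors w_idx =>
    let s1 := (PySem.List.pyRange 0 neighbor_distance 1).foldl (fun acc sk_i =>
      let before_idx := w_idx - 1 - sk_i
      acc ++ [if before_idx > -1 then PySem.List.pyGetD text_tokens before_idx 0 else 0]) []
    let s2 := (PySem.List.pyRange 0 neighbor_distance 1).foldl (fun acc sk_i =>
      let after_idx := w_idx + 1 + sk_i
      acc ++ [if after_idx < text_len then PySem.List.pyGetD text_tokens after_idx 0 else 0]) s1
    edge_neighbors ++ [s2]) []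
-- ===== PORT B =====
def get_word_neighbor_alt (text_tokens : List Int) (neighbor_distance : Int) : List (List Int) :=
  let d : Int := max neighbor_distance 0
  let padded : List Int := List.replicate d.toNat 0 ++ text_tokens ++ List.replicate d.toNat 0
  (PySem.List.pyRange 0 text_tokens.length 1).map (fun w =>
    (PySem.List.slice padded (some w) (some (w + d))).reverse
      ++ PySem.List.slice padded (some (w + d + 1)) (some (w + 2 * d + 1)))

-- ===== PRECONDITION & SPEC =====
def Spec_get_word_neighbor (text_tokens : List Int) (neighbor_distance : Int) (out : List (List Int)) : Prop := out = get_word_neighbor_alt text_tokens neighbor_distance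
instance (text_tokens : List Int) (neighbor_distance : Int) (out : List (List Int)) : Decidable (Spec_get_word_neighbor text_tokens neighbor_distance out) := by unfold Spec_get_word_neighbor; infer_instance

-- ===== CLAIM (what is proved, stated in full; the proofs are below) =====
def Claim_equal_get_word_neighbor : Prop := ∀ (text_tokens : List Int) (neighbor_distance : Int), Dom_get_word_neighbor text_tokens neighbor_distance → Spec_get_word_neighbor text_tokens neighbor_distance (get_word_neighbor text_tokens neighbor_distance)

-- ===== LEMMAS AND PROOFS =====

def gpad (tt : List Int) (j : Int) : Int :=
  if 0 ≤ j ∧ j < tt.length then tt.getD j.toNat 0 else 0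
def nrow (tt : List Int) (dn : Nat) (w : Int) : List Int :=
  (List.range dn).map (fun (i : Nat) => gpad tt (w - 1 - (i : Int))) ++ (List.range dn).map (fun (i : Nat) => gpad tt (w + 1 + (i : Int)))
theorem A_norm (tt : List Int) (nd : Int) :
    get_word_neighbor tt nd = (List.range tt.length).map (fun (w : Nat) => nrow tt nd.toNat (w : Int)) := by
  conv_lhs => simp only [get_word_neighbor, PySem.List.pyRange_one, PySem.List.foldl_append_singleton_eq_map,
    List.map_map, List.nil_append, Int.sub_zero, Int.toNat_natCast]
  apply List.map_congr_left
  intro w hw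
  simp only [List.mem_range] at hw
  simp only [Function.comp, zero_add, nrow]
  congr 1
  · apply List.map_congr_left
    intro i hi
    simp only [List.mem_range] at hi
    simp only [Function.comp_apply]
    by_cases h : (0:Int) ≤ (w:Int) - 1 - i
    · rw [if_pos (by omega), gpad, if_pos ⟨h, by omega⟩,
        PySem.List.pyGetD_eq_getElem tt 0 h (by omega), List.getD_eq_getElem _ _ (by omega)]
    · rw [if_neg (by omega), gpad, if_neg (by omega)]
  · apply List.map_congr_left
    intro i hi
    simp only [List.mem_range] at hi
    simp only [Function.comp_apply]
    by_cases h : ((w:Int) + 1 + i) < (tt.length : Int)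
    · rw [if_pos h, gpad, if_pos ⟨by omega, h⟩,
        PySem.List.pyGetD_eq_getElem tt 0 (by omega) h, List.getD_eq_getElem _ _ (by omega)]
    · rw [if_neg h, gpad, if_neg (by omega)]

theorem padded_length (tt : List Int) (dn : Nat) :
    (List.replicate dn (0:Int) ++ tt ++ List.replicate dn 0).length = dn + tt.length + dn := by
  simp; omega

theorem padded_get (tt : List Int) (dn j : Nat) (hj : j < dn + tt.length + dn) :
    (List.replicate dn (0:Int) ++ tt ++ List.replicate dn 0)[j]'(by rw [padded_length]; omega)
      = gpad tt ((j : Int) - dn) := by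
  rw [List.getElem_append]
  split
  · rename_i hlt
    rw [List.getElem_append]
    split
    · rename_i h1
      simp only [List.length_replicate] at h1
      simp only [List.getElem_replicate, gpad]
      rw [if_neg (by omega)]
    · rename_i h1
      simp only [List.length_replicate] at h1
      simp only [List.length_append, List.length_replicate] at hlt
      simp only [gpad, List.length_replicate]
      rw [if_pos ⟨by omega, by omega⟩, List.getD_eq_getElem _ _ (by omega)]
      congr 1
      omega
  · rename_i hge
    simp only [List.length_append, List.length_replicate] at hge
    simp only [List.getElem_replicate, gpad]
    rw [if_neg (by omega)]

theorem window (tt : List Int) (dn a : Nat) (ha : a ≤ dn + tt.length) :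
    List.take dn (List.drop a (List.replicate dn (0:Int) ++ tt ++ List.replicate dn 0))
      = (List.range dn).map (fun (i : Nat) => gpad tt ((a : Int) + i - dn)) := by
  apply List.ext_getElem
  · simp only [List.length_take, List.length_drop, List.length_map, List.length_range, padded_length]
    omega
  · intro i hi1 hi2
    simp only [List.length_take, List.length_drop, padded_length] at hi1
    rw [List.getElem_take, List.getElem_drop, padded_get tt dn _ (by omega)]
    simp only [List.getElem_map, List.getElem_range]
    congr 1

theorem B_norm (tt : List Int) (nd : Int) :
    get_word_neighbor_alt tt nd = (List.range tt.length).map (fun (w : Nat) => nrow tt nd.toNat (w : Int)) := by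
  have hd : (max nd 0) = ((nd.toNat : Nat) : Int) := by omega
  conv_lhs => simp only [get_word_neighbor_alt, PySem.List.pyRange_one, List.map_map,
    Int.sub_zero, Int.toNat_natCast]
  apply List.map_congr_left
  intro w hw
  simp only [List.mem_range] at hw
  simp only [Function.comp_apply, zero_add, hd, Int.toNat_natCast, nrow]
  set dn := nd.toNat with hdn
  have h2 : (w:Int) + 2 * (dn:Int) + 1 = ((w + dn + 1 : Nat) : Int) + ((dn : Nat) : Int) := by push_cast; omega
  have h1 : (w:Int) + (dn:Int) + 1 = ((w + dn + 1 : Nat) : Int) := by push_cast; omega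
  rw [PySem.List.slice_natCast_add, h1, h2, PySem.List.slice_natCast_add,
    window tt dn w (by omega), window tt dn (w + dn + 1) (by omega)]
  congr 1
  · apply List.ext_getElem
    · simp
    · intro i hi1 hi2
      simp only [List.length_reverse, List.length_map, List.length_range] at hi1
      rw [List.getElem_reverse]
      simp only [List.getElem_map, List.getElem_range, List.length_map, List.length_range]
      congr 1
      omega
  · apply List.map_congr_left
    intro i hi
    congr 1
    push_cast
    omega

-- ===== VERDICT (by name: the statement is the Claim_ definition above) =====
theorem get_word_neighbor_spec : Claim_equal_get_word_neighbor := by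
  intro tt nd _
  unfold Spec_get_word_neighbor
  rw [A_norm, B_norm]
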